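-- pv_equiv track=rewrite | github.com/JayThibs/supervising-ais-improving-ais | src/mechanistic_discovery/behavioral_validation/statistical_validator.py | _categorize_outputs
-- ===== SOURCE A (Python) =====
-- from typing import List, Dict, Any, Optional, Tuple, Callable
--
-- def _categorize_outputs(outputs: List[str]) -> List[str]:
--     """
--     Categorize outputs for chi-squared test.
--
--     This assigns outputs to discrete categories.
--     """
--     categories = []
--
--     for output in outputs:
--         if len(output) < 50:
--             cat = 'short'
--         elif len(output) < 200:
--             cat = 'medium'
--         else:
--             cat = 'long'
--
--         # Could add more sophisticated categorization
--         # e.g., sentiment, style, safety level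
--
--         categories.append(cat)
--
--     return categories
-- ===== SOURCE B (Python) =====
-- _TABLE = ('short', 'medium', 'medium', 'medium', 'long')
--
-- def _categorize_outputs(outputs):
--     """Comparison-free: index a 5-entry table by the capped quotient len//50.
--
--     len//50 == 0  iff len < 50  -> 'short';
--     len//50 in {1,2,3} iff 50 <= len < 200 -> 'medium';
--     len//50 >= 4 iff len >= 200, capped to 4 -> 'long'.
--     """
--     return [_TABLE[min(len(o) // 50, 4)] for o in outputs]
-- ===== Notes on version B (the rewrite author's own statement) =====
-- stated objective: alternative
-- what changed: Replaces the if/elif comparison cascade with comparison-free arithmetic: each output's bucket is the capped quotient min(len//50, 4) used as an index into a precomputed 5-entry label table, in a comprehension instead of an accumulator loop.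
import Mathlib
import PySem

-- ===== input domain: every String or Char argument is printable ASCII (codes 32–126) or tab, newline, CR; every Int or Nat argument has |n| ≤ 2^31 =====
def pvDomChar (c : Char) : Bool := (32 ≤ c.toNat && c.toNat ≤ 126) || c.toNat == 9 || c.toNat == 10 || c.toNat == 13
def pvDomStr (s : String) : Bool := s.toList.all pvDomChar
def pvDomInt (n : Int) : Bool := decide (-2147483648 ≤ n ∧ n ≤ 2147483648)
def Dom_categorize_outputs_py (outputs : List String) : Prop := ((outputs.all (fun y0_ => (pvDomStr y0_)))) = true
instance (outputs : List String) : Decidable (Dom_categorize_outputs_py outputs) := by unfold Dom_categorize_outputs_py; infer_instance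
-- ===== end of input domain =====

-- B replaces A's if/elif comparison cascade and accumulator loop with
-- comparison-free arithmetic: min(len//50, 4) indexes a 5-entry label table
-- (objective: alternative).

-- ===== PORT A =====
-- foldl over outputs accumulating `categories`, branch order as in A
def categorize_outputs_py (outputs : List String) : List String :=
  outputs.foldl (fun categories output =>
    let cat : String :=
      if (PySem.Str.len output) < 50 then "short"
      else if (PySem.Str.len output) < 200 then "medium"
      else "long"
    categories ++ [cat]) []

-- ===== PORT B =====
def pvTable : List String := ["short", "medium", "medium", "medium", "long"]

def categorize_outputs_py_alt (outputs : List String) : List String :=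
  outputs.map (fun o =>
    (PySem.List.pyGet? pvTable
      (min (PySem.Int.floordiv (PySem.Str.len o) 50) 4)).getD "")

-- ===== PRECONDITION & SPEC =====
def Spec_categorize_outputs_py (outputs : List String) (out : List String) : Prop := out = categorize_outputs_py_alt outputs
instance (outputs : List String) (out : List String) : Decidable (Spec_categorize_outputs_py outputs out) := by unfold Spec_categorize_outputs_py; infer_instance

-- ===== CLAIM (what is proved, stated in full; the proofs are below) =====
def Claim_equal_categorize_outputs_py : Prop := ∀ (outputs : List String), Dom_categorize_outputs_py outputs → Spec_categorize_outputs_py outputs (categorize_outputs_py outputs)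

-- ===== LEMMAS AND PROOFS =====

-- per-element agreement of A's cascade with B's capped-quotient table lookup
theorem pv_elem_eq (s : String) :
    (if (PySem.Str.len s) < 50 then "short"
     else if (PySem.Str.len s) < 200 then "medium"
     else "long")
    = (PySem.List.pyGet? pvTable
        (min (PySem.Int.floordiv (PySem.Str.len s) 50) 4)).getD "" := by
  have hlen : PySem.Str.len s = Int.ofNat s.length := by
    simp [PySem.Str.len]
  rw [hlen]
  set n := s.length with hn
  have hfd : PySem.Int.floordiv (Int.ofNat n) 50 = Int.ofNat (n / 50) := by
    simp only [PySem.Int.floordiv]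
    rw [Int.fdiv_eq_ediv_of_nonneg _ (by norm_num)]
    norm_cast
  rw [hfd]
  have hmin : min (Int.ofNat (n / 50)) 4 = Int.ofNat (min (n / 50) 4) := by
    simp [min_def]
    omega
  rw [hmin]
  by_cases h1 : n < 50
  · have : n / 50 = 0 := by omega
    simp [this, pvTable, PySem.List.pyGet?, PySem.List.pyIdx?, h1]
  · by_cases h2 : n < 200
    · have hk : n / 50 = 1 ∨ n / 50 = 2 ∨ n / 50 = 3 := by omega
      rcases hk with hk | hk | hk <;>
        simp [hk, pvTable, PySem.List.pyGet?, PySem.List.pyIdx?, h1, h2]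
    · have hk : min (n / 50) 4 = 4 := by omega
      simp [hk, pvTable, PySem.List.pyGet?, PySem.List.pyIdx?, h1, h2]

-- foldl-append over an accumulator equals map
theorem pv_foldl_append_map {α β : Type} (f : α → β) :
    ∀ (xs : List α) (acc : List β),
      xs.foldl (fun a x => a ++ [f x]) acc = acc ++ xs.map f := by
  intro xs
  induction xs with
  | nil => simp
  | cons x xs ih => intro acc; simp [List.foldl, ih]

-- ===== VERDICT (by name: the statement is the Claim_ definition above) =====
theorem categorize_outputs_py_spec : Claim_equal_categorize_outputs_py := by
  intro outputs _
  unfold Spec_categorize_outputs_py categorize_outputs_py_alt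
  have := pv_foldl_append_map
    (fun s : String =>
      if (PySem.Str.len s) < 50 then "short"
      else if (PySem.Str.len s) < 200 then "medium"
      else "long") outputs []
  unfold categorize_outputs_py
  rw [this]
  exact List.map_congr_left (fun s _ => pv_elem_eq s)
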